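-- pv_equiv track=rewrite | github.com/FoglyOgly/Meowth | meowth/exts/raid/objects.py | team_dict
-- ===== SOURCE A (Python) =====
-- def team_dict(trainer_dict):
--     d = {
--         'mystic': 0,
--         'instinct': 0,
--         'valor': 0,
--         'unknown': 0
--     }
--     for trainer in trainer_dict:
--         if not trainer_dict[trainer].get('status'):
--             continue
--         bluecount = trainer_dict[trainer]['party'][0]
--         yellowcount = trainer_dict[trainer]['party'][1]
--         redcount = trainer_dict[trainer]['party'][2]
--         unknowncount = trainer_dict[trainer]['party'][3]
--         d['mystic'] += bluecount
--         d['instinct'] += yellowcount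
--         d['valor'] += redcount
--         d['unknown'] += unknowncount
--     return d
-- ===== SOURCE B (Python) =====
-- def team_dict(trainer_dict):
--     parties = [v['party'] for v in trainer_dict.values() if v.get('status')]
--     return {
--         'mystic': sum(p[0] for p in parties),
--         'instinct': sum(p[1] for p in parties),
--         'valor': sum(p[2] for p in parties),
--         'unknown': sum(p[3] for p in parties),
--     }
-- ===== Notes on version B (the rewrite author's own statement) =====
-- stated objective: simpler
-- what changed: B replaces A's row-wise accumulation into a mutable four-key dict with a single filter collecting the active trainers' party lists followed by a dict literal of four column sums.
import Mathlib
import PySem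

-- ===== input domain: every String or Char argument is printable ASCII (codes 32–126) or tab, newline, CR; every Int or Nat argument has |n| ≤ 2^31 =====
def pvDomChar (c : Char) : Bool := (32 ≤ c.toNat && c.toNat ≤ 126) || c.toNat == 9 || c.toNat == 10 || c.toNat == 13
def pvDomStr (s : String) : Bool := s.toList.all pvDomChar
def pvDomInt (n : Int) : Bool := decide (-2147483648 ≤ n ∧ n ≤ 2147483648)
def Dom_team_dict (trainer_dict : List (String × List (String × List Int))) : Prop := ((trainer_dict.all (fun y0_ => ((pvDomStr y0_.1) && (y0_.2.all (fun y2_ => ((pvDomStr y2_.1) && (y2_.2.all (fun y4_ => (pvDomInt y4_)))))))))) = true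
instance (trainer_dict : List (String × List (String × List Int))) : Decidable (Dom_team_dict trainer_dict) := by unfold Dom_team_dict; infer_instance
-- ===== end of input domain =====

-- B is simpler: it filters the active parties once and returns a dict literal of four
-- column sums, instead of row-wise accumulation into a mutable dict (same cost).

-- ===== PORT A =====
-- the dict argument / inner dicts are assoc lists; PySem.Dict.ofList gives Python-dict
-- key iteration and lookup (last value wins, first position, distinct keys).
def team_dict (trainer_dict : List (String × List (String × List Int))) : List (String × Int) :=
  let td := PySem.Dict.ofList trainer_dict
  let d0 : PySem.Dict String Int :=
    PySem.Dict.ofList [("mystic", 0), ("instinct", 0), ("valor", 0), ("unknown", 0)]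
  let d := td.keys.foldl (fun d trainer =>
    let inner := PySem.Dict.ofList (td.getD trainer [])
    if inner.getD "status" [] = [] then d   -- `not …get('status')`: continue on missing/empty
    else
      let party := inner.getD "party" []    -- exact under Pre_ (key present there)
      let bluecount := PySem.List.pyGetD party 0 0     -- pyGetD exact under Pre_ (length ≥ 4)
      let yellowcount := PySem.List.pyGetD party 1 0
      let redcount := PySem.List.pyGetD party 2 0
      let unknowncount := PySem.List.pyGetD party 3 0
      let d := d.modify "mystic" 0 (· + bluecount)
      let d := d.modify "instinct" 0 (· + yellowcount)
      let d := d.modify "valor" 0 (· + redcount)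
      d.modify "unknown" 0 (· + unknowncount)) d0
  d.items

-- ===== PORT B =====
def team_dict_alt (trainer_dict : List (String × List (String × List Int))) : List (String × Int) :=
  let td := PySem.Dict.ofList trainer_dict
  let parties := (td.values.filter
      (fun v => !((PySem.Dict.ofList v).getD "status" []).isEmpty)).map
      (fun v => (PySem.Dict.ofList v).getD "party" [])
  [("mystic", (parties.map (fun p => PySem.List.pyGetD p 0 0)).sum),
   ("instinct", (parties.map (fun p => PySem.List.pyGetD p 1 0)).sum),
   ("valor", (parties.map (fun p => PySem.List.pyGetD p 2 0)).sum),
   ("unknown", (parties.map (fun p => PySem.List.pyGetD p 3 0)).sum)]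

-- ===== PRECONDITION & SPEC =====
-- Pre_ excludes exactly the inputs where A raises: a trainer with truthy 'status' whose
-- 'party' is missing (KeyError) or shorter than 4 (IndexError).
def Pre_team_dict (trainer_dict : List (String × List (String × List Int))) : Prop :=
  ∀ v ∈ (PySem.Dict.ofList trainer_dict).values,
    (PySem.Dict.ofList v).getD "status" [] ≠ [] →
      4 ≤ ((PySem.Dict.ofList v).getD "party" []).length
instance (trainer_dict : List (String × List (String × List Int))) : Decidable (Pre_team_dict trainer_dict) := by unfold Pre_team_dict; infer_instance

def pvWitness_team_dict : (List (String × List (String × List Int))) :=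
  [("ash", [("status", [1]), ("party", [1, 2, 3, 4])]),
   ("misty", [("party", [9, 9, 9, 9])])]

def Spec_team_dict (trainer_dict : List (String × List (String × List Int))) (out : List (String × Int)) : Prop := out = team_dict_alt trainer_dict
instance (trainer_dict : List (String × List (String × List Int))) (out : List (String × Int)) : Decidable (Spec_team_dict trainer_dict out) := by unfold Spec_team_dict; infer_instance

-- ===== CLAIM (what is proved, stated in full; the proofs are below) =====
def Claim_equal_team_dict : Prop := ∀ (trainer_dict : List (String × List (String × List Int))), Dom_team_dict trainer_dict → Pre_team_dict trainer_dict → Spec_team_dict trainer_dict (team_dict trainer_dict)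

-- ===== LEMMAS AND PROOFS =====

-- A's loop body, applied to the looked-up trainer value
def pvStep (d : PySem.Dict String Int) (v : List (String × List Int)) : PySem.Dict String Int :=
  let inner := PySem.Dict.ofList v
  if inner.getD "status" [] = [] then d
  else
    let party := inner.getD "party" []
    let d := d.modify "mystic" 0 (· + PySem.List.pyGetD party 0 0)
    let d := d.modify "instinct" 0 (· + PySem.List.pyGetD party 1 0)
    let d := d.modify "valor" 0 (· + PySem.List.pyGetD party 2 0)
    d.modify "unknown" 0 (· + PySem.List.pyGetD party 3 0)

def pvSum (i : Int) (vs : List (List (String × List Int))) : Int :=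
  (((vs.filter (fun v => !((PySem.Dict.ofList v).getD "status" []).isEmpty)).map
      (fun v => (PySem.Dict.ofList v).getD "party" [])).map (fun p => PySem.List.pyGetD p i 0)).sum

lemma pvFold_eq (vs : List (List (String × List Int))) (a b c u : Int) :
    vs.foldl pvStep (PySem.Dict.mk [("mystic", a), ("instinct", b), ("valor", c), ("unknown", u)]) =
    PySem.Dict.mk [("mystic", a + pvSum 0 vs), ("instinct", b + pvSum 1 vs),
                   ("valor", c + pvSum 2 vs), ("unknown", u + pvSum 3 vs)] := by
  induction vs generalizing a b c u with
  | nil => simp [pvSum]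
  | cons v vs ih =>
    by_cases h : (PySem.Dict.ofList v).getD "status" [] = []
    · simp only [List.foldl_cons, pvStep, h, if_true]
      rw [ih]
      simp [pvSum, h]
    · have hstep : pvStep (PySem.Dict.mk [("mystic", a), ("instinct", b), ("valor", c), ("unknown", u)]) v =
        PySem.Dict.mk [("mystic", a + PySem.List.pyGetD ((PySem.Dict.ofList v).getD "party" []) 0 0),
                       ("instinct", b + PySem.List.pyGetD ((PySem.Dict.ofList v).getD "party" []) 1 0),
                       ("valor", c + PySem.List.pyGetD ((PySem.Dict.ofList v).getD "party" []) 2 0),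
                       ("unknown", u + PySem.List.pyGetD ((PySem.Dict.ofList v).getD "party" []) 3 0)] := by
        unfold pvStep
        rw [if_neg h]
        simp [PySem.Dict.modify, PySem.Dict.insert, PySem.Dict.getD, PySem.Dict.get?,
              PySem.Dict.contains]
      rw [List.foldl_cons, hstep, ih]
      simp [pvSum, h]
      refine ⟨by ring, by ring, by ring, by ring⟩

-- ===== VERDICT (by name: the statement is the Claim_ definition above) =====
theorem team_dict_spec : Claim_equal_team_dict := by
  intro trainer_dict _ _
  unfold Spec_team_dict
  have hA : team_dict trainer_dict =
      ((PySem.Dict.ofList trainer_dict).keys.foldl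
        (fun d t => pvStep d ((PySem.Dict.ofList trainer_dict).getD t []))
        (PySem.Dict.mk [("mystic", 0), ("instinct", 0), ("valor", 0), ("unknown", 0)])).items := rfl
  have hB : team_dict_alt trainer_dict =
      [("mystic", pvSum 0 (PySem.Dict.ofList trainer_dict).values),
       ("instinct", pvSum 1 (PySem.Dict.ofList trainer_dict).values),
       ("valor", pvSum 2 (PySem.Dict.ofList trainer_dict).values),
       ("unknown", pvSum 3 (PySem.Dict.ofList trainer_dict).values)] := rfl
  rw [hA, hB, ← List.foldl_map,
      ← PySem.Dict.values_eq_map_keys _ (PySem.Dict.nodup_keys_ofList _) [],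
      pvFold_eq]
  simp
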